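-- pv_equiv track=rewrite | github.com/bazaar-community/bazaar-old | bzrlib/tests/test_transform.py | has_named_child
-- ===== SOURCE A (Python) =====
-- def has_named_child(by_parent, parent_id, name):
--     for child_id in by_parent[parent_id]:
--         if child_id == '0':
--             if name == "name~":
--                 return True
--         elif name == "name.~%s~" % child_id:
--             return True
--     return False
-- ===== SOURCE B (Python) =====
-- def has_named_child(by_parent, parent_id, name):
--     children = by_parent[parent_id]
--     if name == "name~":
--         return '0' in children
--     if len(name) >= 7 and name.startswith("name.~") and name.endswith("~"):
--         cand = name[6:-1]
--         return cand != '0' and cand in children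
--     return False
-- ===== Notes on version B (the rewrite author's own statement) =====
-- stated objective: simpler
-- what changed: Instead of scanning every child and formatting 'name.~%s~' per child, B decodes the name once (exact-match 'name~' -> child '0'; prefix 'name.~' + suffix '~' -> the one candidate child id) and does a single membership test on the children list.
import Mathlib
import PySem

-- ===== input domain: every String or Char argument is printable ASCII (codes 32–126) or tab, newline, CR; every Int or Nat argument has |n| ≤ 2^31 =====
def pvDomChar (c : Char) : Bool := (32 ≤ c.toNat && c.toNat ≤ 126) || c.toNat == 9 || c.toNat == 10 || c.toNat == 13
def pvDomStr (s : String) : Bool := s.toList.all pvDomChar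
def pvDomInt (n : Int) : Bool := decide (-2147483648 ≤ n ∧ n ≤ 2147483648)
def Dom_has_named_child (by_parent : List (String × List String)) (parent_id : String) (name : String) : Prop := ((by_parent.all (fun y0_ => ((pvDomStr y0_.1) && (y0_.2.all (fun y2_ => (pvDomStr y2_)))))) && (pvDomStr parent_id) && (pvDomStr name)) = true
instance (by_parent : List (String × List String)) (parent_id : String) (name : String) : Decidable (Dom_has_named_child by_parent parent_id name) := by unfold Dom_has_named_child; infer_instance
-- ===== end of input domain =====

-- B replaces A's per-child scan-and-format with a single decode of `name` plus one membership test.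
-- Side effects: none in either version.

-- ===== PORT A =====
-- "name.~%s~" % child  (exact on the ASCII domain; concatenation done on List Char, where it is kernel-transparent)
def pvFmt (child : List Char) : List Char := "name.~".toList ++ child ++ "~".toList

-- the for-loop of A with its early returns
def pvLoopA (name : List Char) : List (List Char) → Bool
  | [] => false
  | c :: rest =>
    if c = "0".toList then
      (if name = "name~".toList then true else pvLoopA name rest)
    else if name = pvFmt c then true
    else pvLoopA name rest

def has_named_child (by_parent : List (String × List String)) (parent_id : String) (name : String) : Bool :=
  match (PySem.Dict.mk by_parent).get? parent_id with
  | none => false   -- KeyError in Python; excluded by Pre_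
  | some children => pvLoopA name.toList (children.map String.toList)

-- ===== PORT B =====
def has_named_child_alt (by_parent : List (String × List String)) (parent_id : String) (name : String) : Bool :=
  match (PySem.Dict.mk by_parent).get? parent_id with
  | none => false   -- KeyError in Python; excluded by Pre_
  | some children =>
    let n := name.toList
    if n = "name~".toList then (children.map String.toList).contains "0".toList
    else if 7 ≤ n.length && PySem.Chars.startswith n "name.~".toList && PySem.Chars.endswith n "~".toList then
      let cand := PySem.Chars.slice n (some 6) (some (-1))   -- name[6:-1]
      decide (cand ≠ "0".toList) && (children.map String.toList).contains cand
    else false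

-- ===== PRECONDITION & SPEC =====
-- Pre_ excludes exactly the inputs where by_parent[parent_id] raises KeyError (both A and B raise there).
def Pre_has_named_child (by_parent : List (String × List String)) (parent_id : String) (name : String) : Prop :=
  ((PySem.Dict.mk by_parent).get? parent_id).isSome = true
instance (by_parent : List (String × List String)) (parent_id : String) (name : String) : Decidable (Pre_has_named_child by_parent parent_id name) := by unfold Pre_has_named_child; infer_instance

def pvWitness_has_named_child : (List (String × List String)) × String × String :=
  ([("p", ["0", "a"])], "p", "name.~a~")

def Spec_has_named_child (by_parent : List (String × List String)) (parent_id : String) (name : String) (out : Bool) : Prop := out = has_named_child_alt by_parent parent_id name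
instance (by_parent : List (String × List String)) (parent_id : String) (name : String) (out : Bool) : Decidable (Spec_has_named_child by_parent parent_id name out) := by unfold Spec_has_named_child; infer_instance

-- ===== CLAIM (what is proved, stated in full; the proofs are below) =====
def Claim_equal_has_named_child : Prop := ∀ (by_parent : List (String × List String)) (parent_id : String) (name : String), Dom_has_named_child by_parent parent_id name → Pre_has_named_child by_parent parent_id name → Spec_has_named_child by_parent parent_id name (has_named_child by_parent parent_id name)

-- ===== LEMMAS AND PROOFS =====

-- B's decode condition and candidate, on the list side
def pvCond (n : List Char) : Bool :=
  7 ≤ n.length && PySem.Chars.startswith n "name.~".toList && PySem.Chars.endswith n "~".toList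

def pvCand (n : List Char) : List Char := PySem.Chars.slice n (some 6) (some (-1))

lemma pvCond_fmt (c : List Char) : pvCond (pvFmt c) = true := by
  simp [pvCond, pvFmt, PySem.Chars.startswith_iff, PySem.Chars.endswith_iff]
  exact ⟨'n'::'a'::'m'::'e'::'.'::'~'::c, by simp⟩
lemma pvCand_fmt (c : List Char) : pvCand (pvFmt c) = c := by
  simp [pvCand, pvFmt, PySem.List.slice, PySem.List.clampIdx]
  rw [if_neg (by omega)]
  have h : ((c.length:Int) + 1 + 1 + 1 + 1 + 1 + 1).toNat - 6 = c.length := by omega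
  rw [h, List.take_append_of_le_length (le_refl _), List.take_length]
lemma pvDecode (n : List Char) (h : pvCond n = true) : n = pvFmt (pvCand n) := by
  simp [pvCond, PySem.Chars.startswith_iff, PySem.Chars.endswith_iff] at h
  obtain ⟨⟨hlen, t, ht⟩, p, hp⟩ := h
  rcases List.eq_nil_or_concat t with h0 | ⟨t', x, h1⟩
  · subst h0; simp [← ht] at hlen
  · rw [List.concat_eq_append] at h1
    subst h1
    have hx : x = '~' := by
      have h3 := congrArg List.getLast? hp
      rw [← ht, ← List.append_assoc] at h3
      rw [List.getLast?_concat, List.getLast?_concat] at h3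
      exact (Option.some.inj h3).symm
    subst hx
    have h2 : n = pvFmt t' := by rw [← ht, pvFmt]; simp
    rw [h2, pvCand_fmt]
lemma pvFmt_ne_name (c : List Char) : pvFmt c ≠ "name~".toList := by
  intro h
  have := congrArg List.length h
  simp [pvFmt] at this

-- the heart: A's loop equals B's single decode-and-membership test
lemma pvLoop_eq (n : List Char) (cs : List (List Char)) :
    pvLoopA n cs =
      (if n = "name~".toList then cs.contains "0".toList
       else if pvCond n then decide (pvCand n ≠ "0".toList) && cs.contains (pvCand n)
       else false) := by
  induction cs with
  | nil => simp [pvLoopA]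
  | cons c cs ih =>
    by_cases hc : c = ['0']
    · subst hc
      by_cases hn : n = ['n', 'a', 'm', 'e', '~']
      · simp [pvLoopA, hn]
      · by_cases hcond : pvCond n = true
        · by_cases hcand : pvCand n = ['0']
          · simp [pvLoopA, hn, hcond, hcand, ih]
          · simp [pvLoopA, hn, hcond, hcand, ih]
        · simp [pvLoopA, hn, hcond, ih]
    · by_cases hfc : n = pvFmt c
      · subst hfc
        have h1 : ¬ pvFmt c = ['n', 'a', 'm', 'e', '~'] := pvFmt_ne_name c
        have h2 : pvCond (pvFmt c) = true := pvCond_fmt c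
        have h3 : pvCand (pvFmt c) = c := pvCand_fmt c
        simp [pvLoopA, hc, h1, h2, h3]
      · simp only [pvLoopA, if_neg hfc, ih]
        by_cases hn : n = ['n', 'a', 'm', 'e', '~']
        · subst hn
          have hc' : ¬ ['0'] = c := fun h => hc h.symm
          simp [hc, hc']
        · by_cases hcond : pvCond n = true
          · have hcc : ¬ pvCand n = c := fun h => hfc (by rw [pvDecode n hcond, h])
            simp [hn, hcond, hcc]
          · simp [hn, hcond]

-- ===== VERDICT (by name: the statement is the Claim_ definition above) =====
theorem has_named_child_spec : Claim_equal_has_named_child := by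
  intro bp pid name _ _
  unfold Spec_has_named_child has_named_child has_named_child_alt
  cases h : (PySem.Dict.mk bp).get? pid with
  | none => rfl
  | some children => simp only []; rw [pvLoop_eq]; rfl
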